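-- pv_equiv track=rewrite | github.com/ifeanyicyriacus/pythonClass | classwork/may_2025/task/breakfast.py | circle_arrangement
-- ===== SOURCE A (Python) =====
-- def circle_arrangement(text1) -> [str]:
--     new_arrangements = [text1]
--     n = len(text1)
--
--     while n > 0:
--         temp = text1[1:] + text1[0]
--         new_arrangements.append(temp)
--         text1 = temp
--         n -= 1
--     return new_arrangements
-- ===== SOURCE B (Python) =====
-- def circle_arrangement(text1) -> [str]:
--     return [text1[i:] + text1[:i] for i in range(len(text1) + 1)]
-- ===== Notes on version B (the rewrite author's own statement) =====
-- stated objective: simpler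
-- what changed: Each rotation is computed independently by slicing the original string at index i (one comprehension, no state threaded between iterations), instead of repeatedly rotating the previous result in a while loop with an accumulator list.
import Mathlib
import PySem

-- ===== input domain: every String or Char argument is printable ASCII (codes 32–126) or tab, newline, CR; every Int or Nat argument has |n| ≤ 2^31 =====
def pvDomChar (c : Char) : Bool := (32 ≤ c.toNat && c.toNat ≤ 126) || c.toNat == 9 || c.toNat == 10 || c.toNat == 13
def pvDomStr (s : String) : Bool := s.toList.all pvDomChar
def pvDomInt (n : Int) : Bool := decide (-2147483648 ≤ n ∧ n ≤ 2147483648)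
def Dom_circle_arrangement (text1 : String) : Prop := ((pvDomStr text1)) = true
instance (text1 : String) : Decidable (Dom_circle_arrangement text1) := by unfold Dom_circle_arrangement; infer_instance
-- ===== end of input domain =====

-- B computes each rotation independently by slicing the original at index i
-- (comprehension over range) instead of A's while loop rotating the previous result; objective: simpler.

-- ===== PORT A =====
-- while n > 0: temp = text1[1:] + text1[0]; append; text1 = temp; n -= 1
def pvALoop : Nat → List Char → List String → List String
  | 0, _, acc => acc
  | n + 1, t, acc =>
    let temp := PySem.List.slice t (some 1) none ++ ((PySem.List.pyGet? t 0).elim [] (fun c => [c]))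
    pvALoop n temp (acc ++ [String.ofList temp])

def circle_arrangement (text1 : String) : List String :=
  pvALoop text1.toList.length text1.toList [String.ofList text1.toList]

-- ===== PORT B =====
def circle_arrangement_alt (text1 : String) : List String :=
  (PySem.List.pyRange 0 ((text1.toList.length : Int) + 1) 1).map
    (fun i => String.ofList (PySem.List.slice text1.toList (some i) none
                             ++ PySem.List.slice text1.toList none (some i)))

-- ===== PRECONDITION & SPEC =====
def Spec_circle_arrangement (text1 : String) (out : List String) : Prop := out = circle_arrangement_alt text1
instance (text1 : String) (out : List String) : Decidable (Spec_circle_arrangement text1 out) := by unfold Spec_circle_arrangement; infer_instance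

-- ===== CLAIM (what is proved, stated in full; the proofs are below) =====
def Claim_equal_circle_arrangement : Prop := ∀ (text1 : String), Dom_circle_arrangement text1 → Spec_circle_arrangement text1 (circle_arrangement text1)

-- ===== LEMMAS AND PROOFS =====

-- one step of A's loop is a rotation by one
lemma pvStep_eq_rotate (t : List Char) :
    PySem.List.slice t (some 1) none ++ ((PySem.List.pyGet? t 0).elim [] (fun c => [c]))
      = t.rotate 1 := by
  cases t with
  | nil => simp [PySem.List.slice, PySem.List.pyGet?, PySem.List.pyIdx?]
  | cons c cs =>
    rw [PySem.List.slice_from (c :: cs) (by norm_num)]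
    rw [show (1 : Nat) = 0 + 1 from rfl, List.rotate_cons_succ, List.rotate_zero]
    simp [PySem.List.pyGet?, PySem.List.pyIdx?]

lemma pvALoop_eq (n : Nat) (t : List Char) (acc : List String) :
    pvALoop n t acc = acc ++ (List.range n).map (fun i => String.ofList (t.rotate (i + 1))) := by
  induction n generalizing t acc with
  | zero => simp [pvALoop]
  | succ m ih =>
    rw [pvALoop, ih, List.range_succ_eq_map]
    simp only [pvStep_eq_rotate, List.rotate_rotate, List.map_cons, List.map_map,
      List.append_assoc, List.singleton_append]
    congr 2
    apply List.map_congr_left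
    intro i _
    simp only [Function.comp_apply]
    rw [show 1 + (i + 1) = i + 1 + 1 by omega]

-- B unfolded to drop/take over List.range
lemma pvAlt_eq (text1 : String) :
    circle_arrangement_alt text1
      = (List.range (text1.toList.length + 1)).map
          (fun k => String.ofList (text1.toList.drop k ++ text1.toList.take k)) := by
  unfold circle_arrangement_alt
  rw [show ((text1.toList.length : Int) + 1) = (((text1.toList.length + 1 : Nat)) : Int) by push_cast; ring]
  rw [PySem.List.pyRange_zero_nat, List.map_map]
  apply List.map_congr_left
  intro k _
  simp only [Function.comp_apply]
  rw [PySem.List.slice_from text1.toList (by positivity), PySem.List.slice_to text1.toList (by positivity)]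
  simp

-- ===== VERDICT (by name: the statement is the Claim_ definition above) =====
theorem circle_arrangement_spec : Claim_equal_circle_arrangement := by
  intro text1 _
  unfold Spec_circle_arrangement
  unfold circle_arrangement
  rw [pvALoop_eq, pvAlt_eq, List.range_succ_eq_map]
  simp only [List.map_cons, List.map_map, List.drop_zero, List.take_zero, List.append_nil,
    List.singleton_append]
  congr 1
  apply List.map_congr_left
  intro i hi
  simp only [Function.comp]
  rw [List.rotate_eq_drop_append_take (by simpa using Nat.lt_iff_add_one_le.mp (List.mem_range.mp hi))]
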